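-- pv_equiv track=rewrite | github.com/pok125/Python | 연습문제/python_probelm_50_2.py | check_block_order
-- ===== SOURCE A (Python) =====
-- def check_block_order(blocks, rule):
--     cur_rule = 0
--     for i in blocks:
--         if i in rule:
--             if cur_rule > rule.index(i):
--                 return 'impossible'
--             cur_rule = rule.index(i)
--     return 'possible'
-- ===== SOURCE B (Python) =====
-- def check_block_order(blocks, rule):
--     positions = [rule.index(b) for b in blocks if b in rule]
--     return 'possible' if positions == sorted(positions) else 'impossible'
-- ===== Notes on version B (the rewrite author's own statement) =====
-- stated objective: simpler
-- what changed: Replaces the interleaved scan with cur_rule state by materializing the list of rule positions and checking it equals its sort.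
import Mathlib
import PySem

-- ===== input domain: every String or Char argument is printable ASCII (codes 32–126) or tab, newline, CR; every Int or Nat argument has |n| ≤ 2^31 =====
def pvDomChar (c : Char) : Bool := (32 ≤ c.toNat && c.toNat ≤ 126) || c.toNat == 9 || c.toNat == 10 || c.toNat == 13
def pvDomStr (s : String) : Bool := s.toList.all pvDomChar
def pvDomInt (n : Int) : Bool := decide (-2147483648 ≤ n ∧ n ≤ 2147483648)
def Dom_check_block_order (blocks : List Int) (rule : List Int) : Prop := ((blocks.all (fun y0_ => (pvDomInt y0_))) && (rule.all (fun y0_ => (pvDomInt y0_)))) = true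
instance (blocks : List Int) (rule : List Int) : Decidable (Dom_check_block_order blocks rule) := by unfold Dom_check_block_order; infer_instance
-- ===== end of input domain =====

-- B replaces A's interleaved scan with "materialize positions, compare with its sort" (objective: simpler).

-- ===== PORT A =====
-- the for-loop with early return, carrying cur_rule; inside the `i ∈ rule` branch
-- `rule.index(i)` is `(index? rule i).getD 0`, exact there since index? is some iff i ∈ rule
def checkBlockOrderGo (rule : List Int) : List Int → Nat → String
  | [], _ => "possible"
  | i :: rest, cur =>
    if i ∈ rule then
      let k := (PySem.List.index? rule i).getD 0
      if cur > k then "impossible" else checkBlockOrderGo rule rest k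
    else checkBlockOrderGo rule rest cur

def check_block_order (blocks : List Int) (rule : List Int) : String :=
  checkBlockOrderGo rule blocks 0

-- ===== PORT B =====
def check_block_order_alt (blocks : List Int) (rule : List Int) : String :=
  let positions := blocks.filterMap (fun b => PySem.List.index? rule b)
  if positions = PySem.List.sorted positions (fun x => x) false then "possible" else "impossible"

-- ===== PRECONDITION & SPEC =====
def Spec_check_block_order (blocks : List Int) (rule : List Int) (out : String) : Prop := out = check_block_order_alt blocks rule
instance (blocks : List Int) (rule : List Int) (out : String) : Decidable (Spec_check_block_order blocks rule out) := by unfold Spec_check_block_order; infer_instance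

-- ===== CLAIM (what is proved, stated in full; the proofs are below) =====
def Claim_equal_check_block_order : Prop := ∀ (blocks : List Int) (rule : List Int), Dom_check_block_order blocks rule → Spec_check_block_order blocks rule (check_block_order blocks rule)

-- ===== LEMMAS AND PROOFS =====

-- A's loop answers "possible" exactly when cur followed by the positions list is pairwise ≤
theorem checkBlockOrderGo_eq (rule : List Int) (blocks : List Int) (cur : Nat) :
    checkBlockOrderGo rule blocks cur =
      if List.Pairwise (· ≤ ·) (cur :: blocks.filterMap (fun b => PySem.List.index? rule b))
      then "possible" else "impossible" := by
  induction blocks generalizing cur with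
  | nil => simp [checkBlockOrderGo]
  | cons i rest ih =>
    by_cases hm : i ∈ rule
    · obtain ⟨k, hk⟩ : ∃ k, PySem.List.index? rule i = some k :=
        Option.isSome_iff_exists.mp ((PySem.List.index?_isSome_iff (xs := rule) (v := i)).mpr hm)
      simp only [checkBlockOrderGo, hm, if_pos, hk, Option.getD_some, List.filterMap_cons]
      rw [ih]
      by_cases hlt : cur > k
      · have : ¬ List.Pairwise (· ≤ ·)
            (cur :: k :: rest.filterMap (fun b => PySem.List.index? rule b)) := by
          intro hp
          exact absurd ((List.pairwise_cons.mp hp).1 k (by simp)) (Nat.not_le_of_gt hlt)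
        rw [if_pos hlt, if_neg this]
      · have hck : cur ≤ k := Nat.le_of_not_gt hlt
        have hiff : List.Pairwise (· ≤ ·)
              (cur :: k :: rest.filterMap (fun b => PySem.List.index? rule b)) ↔
            List.Pairwise (· ≤ ·) (k :: rest.filterMap (fun b => PySem.List.index? rule b)) := by
          constructor
          · exact fun hp => (List.pairwise_cons.mp hp).2
          · intro hp
            refine List.pairwise_cons.mpr ⟨?_, hp⟩
            intro a ha
            rcases List.mem_cons.mp ha with h | h
            · exact h ▸ hck
            · exact le_trans hck ((List.pairwise_cons.mp hp).1 a h)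
        simp only [hlt, not_false_eq_true, if_neg]
        simp only [hiff]
    · simp only [checkBlockOrderGo, hm, List.filterMap_cons,
        (PySem.List.index?_eq_none_iff (xs := rule) (v := i)).mpr hm]
      exact ih cur

-- a list of naturals equals its Python sort iff it is pairwise ≤
theorem eq_sorted_iff_pairwise (ps : List Nat) :
    ps = PySem.List.sorted ps (fun x => x) false ↔ ps.Pairwise (· ≤ ·) := by
  constructor
  · intro h
    have := PySem.List.sorted_pairwise (xs := ps) (key := fun x : Nat => x)
    rw [← h] at this
    exact this
  · intro h
    exact (PySem.List.sorted_eq_self_of_pairwise ps (fun x => x) h).symm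

-- ===== VERDICT (by name: the statement is the Claim_ definition above) =====
theorem check_block_order_spec : Claim_equal_check_block_order := by
  intro blocks rule _
  unfold Spec_check_block_order check_block_order check_block_order_alt
  rw [checkBlockOrderGo_eq]
  have hp : List.Pairwise (· ≤ ·)
        ((0 : Nat) :: blocks.filterMap (fun b => PySem.List.index? rule b)) ↔
      List.Pairwise (· ≤ ·) (blocks.filterMap (fun b => PySem.List.index? rule b)) := by
    constructor
    · exact fun h => (List.pairwise_cons.mp h).2
    · exact fun h => List.pairwise_cons.mpr ⟨fun a _ => Nat.zero_le a, h⟩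
  simp only [hp]
  by_cases h : blocks.filterMap (fun b => PySem.List.index? rule b) =
      PySem.List.sorted (blocks.filterMap (fun b => PySem.List.index? rule b)) (fun x => x) false
  · rw [if_pos ((eq_sorted_iff_pairwise _).mp h), if_pos h]
  · rw [if_neg (fun hpw => h ((eq_sorted_iff_pairwise _).mpr hpw)), if_neg h]
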